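-- pv_equiv track=rewrite | github.com/senthilts9/python-coding-challenges | search/Array Pairs.py | solve
-- ===== SOURCE A (Python) =====
-- def solve(arr):
--     # Write your code here
--     n = len(arr)
--     count = 1
--
--
--     for j in range(n):
--         max_value = arr[j]
--
--         for i in range(j):
--             max_value = max(max_value, arr[i])
--             if arr[i] * arr[j] <= max_value:
--                 count += 1
--     return count
-- ===== SOURCE B (Python) =====
-- def solve(arr):
--     # Enumerate pairs by their LEFT element: peel the head off the suffix one
--     # step at a time, keep a single running prefix max, and count partners in
--     # the remaining suffix. (A enumerates pairs by the right element and
--     # recomputes a running max inside the inner loop.)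
--     total = 1
--     m = None
--     rest = arr
--     while rest:
--         x = rest[0]
--         rest = rest[1:]
--         m = x if m is None else max(m, x)
--         total += sum(1 for y in rest if x * y <= max(y, m))
--     return total
-- ===== Notes on version B (the rewrite author's own statement) =====
-- stated objective: alternative
-- what changed: B enumerates pairs by their LEFT element over shrinking suffixes (peel head, count partners in the remaining suffix) with one global running prefix max, instead of A's index loops by right element that restart a running max inside the inner loop; the proof swaps the pair enumeration order.
import Mathlib
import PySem

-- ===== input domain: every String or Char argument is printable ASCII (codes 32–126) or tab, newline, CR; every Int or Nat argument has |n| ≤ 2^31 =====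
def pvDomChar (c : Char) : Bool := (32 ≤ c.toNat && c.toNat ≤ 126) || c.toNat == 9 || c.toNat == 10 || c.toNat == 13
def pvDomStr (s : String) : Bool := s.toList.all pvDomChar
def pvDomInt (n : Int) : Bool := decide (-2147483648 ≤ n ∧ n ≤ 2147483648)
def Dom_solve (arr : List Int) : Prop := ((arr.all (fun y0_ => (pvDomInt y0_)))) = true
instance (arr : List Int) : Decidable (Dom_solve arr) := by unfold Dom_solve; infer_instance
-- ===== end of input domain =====

-- B counts each pair from its LEFT element over shrinking suffixes with one global
-- running prefix max, instead of A's right-element index loops that restart a running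
-- max in the inner loop; same O(n^2) cost (objective: alternative).


-- ===== PORT A =====
-- indices produced by range(n)/range(j) are always in bounds, so pyGetD (default 0) is exact here
def solve (arr : List Int) : Int :=
  let n := arr.length
  (PySem.List.pyRange 0 (n : Int) 1).foldl (fun count j =>
    let aj := PySem.List.pyGetD arr j 0
    ((PySem.List.pyRange 0 j 1).foldl (fun (s : Int × Int) i =>
        let ai := PySem.List.pyGetD arr i 0
        let mv := max s.2 ai
        (if ai * aj ≤ mv then s.1 + 1 else s.1, mv)) (count, aj)).1) 1

-- ===== PORT B =====
-- `sum(1 for y in rest if x * y <= max(y, m))`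
def pvSuffCount (x m : Int) (rest : List Int) : Int :=
  (rest.map (fun y => if x * y ≤ max y m then (1 : Int) else 0)).sum

-- the while-loop of Source B: peel the head, update the running prefix max, count in the suffix
def pvScan (m : Option Int) (rest : List Int) (total : Int) : Int :=
  match rest with
  | [] => total
  | x :: t =>
    let m' := match m with | none => x | some m0 => max m0 x
    pvScan (some m') t (total + pvSuffCount x m' t)

def solve_alt (arr : List Int) : Int := pvScan none arr 1

-- ===== PRECONDITION & SPEC =====
def Spec_solve (arr : List Int) (out : Int) : Prop := out = solve_alt arr
instance (arr : List Int) (out : Int) : Decidable (Spec_solve arr out) := by unfold Spec_solve; infer_instance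

-- ===== CLAIM (what is proved, stated in full; the proofs are below) =====
def Claim_equal_solve : Prop := ∀ (arr : List Int), Dom_solve arr → Spec_solve arr (solve arr)

-- ===== LEMMAS AND PROOFS =====

-- reference prefix maximum: pvPm arr i = max arr[0..i] (via getD)
def pvPm (arr : List Int) : Nat → Int
  | 0 => arr.getD 0 0
  | k + 1 => max (pvPm arr k) (arr.getD (k + 1) 0)

theorem pvPm_cons (x : Int) (xs : List Int) (i : Nat) :
    pvPm (x :: xs) (i + 1) = max x (pvPm xs i) := by
  induction i with
  | zero => simp [pvPm]
  | succ k ih =>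
    show max (pvPm (x :: xs) (k + 1)) ((x :: xs).getD (k + 2) 0) = max x (pvPm xs (k + 1))
    rw [ih, List.getD_cons_succ, max_assoc]
    rfl

theorem pvPm_head_le (x : Int) (xs : List Int) (i : Nat) :
    x ≤ pvPm (x :: xs) i := by
  cases i with
  | zero => simp [pvPm]
  | succ k => rw [pvPm_cons]; exact le_max_left _ _

-- generalized index-form double sum, right-element outer, with ambient max m
def pvSg (m : Int) (arr : List Int) : Int :=
  ((List.range arr.length).map (fun j =>
    ((List.range j).map (fun i =>
      if arr.getD i 0 * arr.getD j 0 ≤ max (arr.getD j 0) (max m (pvPm arr i))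
      then (1 : Int) else 0)).sum)).sum

-- A's index-form double sum (no ambient m)
def pvSidx (arr : List Int) : Int :=
  ((List.range arr.length).map (fun j =>
    ((List.range j).map (fun i =>
      if arr.getD i 0 * arr.getD j 0 ≤ max (arr.getD j 0) (pvPm arr i)
      then (1 : Int) else 0)).sum)).sum

theorem map_range_getD {β : Type} (t : List Int) (f : Int → β) :
    (List.range t.length).map (fun j => f (t.getD j 0)) = t.map f := by
  induction t with
  | nil => rfl
  | cons a t ih =>
    rw [List.length_cons, List.range_succ_eq_map, List.map_cons, List.map_map]
    simpa using congrArg (List.cons (f a)) (by simpa [Function.comp_def] using ih)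

-- the inner loop of A: running-max state versus the prefix-max function
theorem innerA (arr : List Int) (aj : Int) (k : Nat) (c m : Int) :
    (List.range k).foldl (fun (s : Int × Int) i =>
        (if arr.getD i 0 * aj ≤ max s.2 (arr.getD i 0) then s.1 + 1 else s.1,
         max s.2 (arr.getD i 0))) (c, m)
    = (c + ((List.range k).map (fun i =>
          if arr.getD i 0 * aj ≤ max m (pvPm arr i) then (1 : Int) else 0)).sum,
       if k = 0 then m else max m (pvPm arr (k - 1))) := by
  induction k with
  | zero => simp
  | succ n ih =>
    rw [List.range_succ, List.foldl_append, List.map_append, ih]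
    have hmax : max (if n = 0 then m else max m (pvPm arr (n - 1))) (arr.getD n 0)
        = max m (pvPm arr n) := by
      cases n with
      | zero => simp [pvPm]
      | succ n' => simp [pvPm, max_assoc]
    simp only [List.foldl_cons, List.foldl_nil, List.map_cons, List.map_nil, hmax,
      List.sum_append, List.sum_cons, List.sum_nil, Nat.add_one_ne_zero, if_false,
      Nat.add_sub_cancel]
    refine Prod.ext ?_ rfl
    split <;> ring

theorem solve_eq_Sidx (arr : List Int) : solve arr = 1 + pvSidx arr := by
  unfold solve pvSidx
  simp only [PySem.List.pyRange_zero_natCast, List.foldl_map]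
  rw [PySem.List.foldl_congr_mem (List.range arr.length) _
      (fun c j => c + ((List.range j).map (fun i =>
          if arr.getD i 0 * arr.getD j 0 ≤ max (arr.getD j 0) (pvPm arr i)
          then (1 : Int) else 0)).sum) 1 ?_]
  · rw [PySem.List.foldl_add]
  · intro c j _
    simp only [PySem.List.pyGetD_natCast]
    rw [innerA arr (arr.getD j 0) j c (arr.getD j 0)]

-- cons step of the generalized sum: peel the right-element index down to the tail
theorem pvSg_cons (m x : Int) (xs : List Int) :
    pvSg m (x :: xs) = pvSuffCount x (max m x) xs + pvSg (max m x) xs := by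
  unfold pvSg pvSuffCount
  rw [List.length_cons, List.range_succ_eq_map, List.map_cons, List.map_map]
  have hinner : ∀ j : Nat,
      ((List.range (j + 1)).map (fun i =>
        if (x :: xs).getD i 0 * (x :: xs).getD (j + 1) 0
            ≤ max ((x :: xs).getD (j + 1) 0) (max m (pvPm (x :: xs) i))
        then (1 : Int) else 0)).sum
      = (if x * xs.getD j 0 ≤ max (xs.getD j 0) (max m x) then (1 : Int) else 0)
        + ((List.range j).map (fun i =>
            if xs.getD i 0 * xs.getD j 0 ≤ max (xs.getD j 0) (max (max m x) (pvPm xs i))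
            then (1 : Int) else 0)).sum := by
    intro j
    rw [List.range_succ_eq_map, List.map_cons, List.map_map, List.sum_cons]
    refine congrArg₂ (· + ·) ?_ ?_
    · simp [pvPm]
    · refine congrArg List.sum (List.map_congr_left ?_)
      intro i _
      simp only [Function.comp_apply, Nat.succ_eq_add_one, List.getD_cons_succ, pvPm_cons,
        ← max_assoc]
  have : ((List.range xs.length).map (Nat.succ · ) |>.map (fun j =>
      ((List.range j).map (fun i =>
        if (x :: xs).getD i 0 * (x :: xs).getD j 0
            ≤ max ((x :: xs).getD j 0) (max m (pvPm (x :: xs) i))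
        then (1 : Int) else 0)).sum)).sum
      = ((List.range xs.length).map (fun j =>
          (if x * xs.getD j 0 ≤ max (xs.getD j 0) (max m x) then (1 : Int) else 0)
          + ((List.range j).map (fun i =>
              if xs.getD i 0 * xs.getD j 0 ≤ max (xs.getD j 0) (max (max m x) (pvPm xs i))
              then (1 : Int) else 0)).sum)).sum := by
    rw [List.map_map]
    exact congrArg List.sum (List.map_congr_left (fun j _ => hinner j))
  rw [List.sum_cons]
  simp only [List.range_zero, List.map_nil, List.sum_nil, zero_add]
  rw [← List.map_map, this, List.sum_map_add]
  congr 1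
  exact congrArg List.sum (map_range_getD xs (fun y => if x * y ≤ max y (max m x) then (1 : Int) else 0))

-- B's scan computes the generalized sum
theorem pvScan_some (xs : List Int) (m c : Int) :
    pvScan (some m) xs c = c + pvSg m xs := by
  induction xs generalizing m c with
  | nil => simp [pvScan, pvSg]
  | cons x t ih =>
    show pvScan (some (max m x)) t (c + pvSuffCount x (max m x) t) = c + pvSg m (x :: t)
    rw [ih, pvSg_cons]
    ring

-- ambient max x is absorbed by the prefix max of x :: xs
theorem pvSidx_cons (x : Int) (xs : List Int) :
    pvSidx (x :: xs) = pvSg x (x :: xs) := by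
  unfold pvSidx pvSg
  refine congrArg List.sum (List.map_congr_left ?_)
  intro j _
  refine congrArg List.sum (List.map_congr_left ?_)
  intro i _
  have : max x (pvPm (x :: xs) i) = pvPm (x :: xs) i :=
    max_eq_right (pvPm_head_le x xs i)
  rw [this]

theorem solve_eq_alt (arr : List Int) : solve arr = solve_alt arr := by
  rw [solve_eq_Sidx]
  cases arr with
  | nil => rfl
  | cons x xs =>
    show 1 + pvSidx (x :: xs) = pvScan none (x :: xs) 1
    rw [pvSidx_cons, pvSg_cons]
    show _ = pvScan (some x) xs (1 + pvSuffCount x x xs)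
    rw [pvScan_some, max_self]
    ring

-- ===== VERDICT (by name: the statement is the Claim_ definition above) =====
theorem solve_spec : Claim_equal_solve := by
  intro arr _
  unfold Spec_solve
  exact solve_eq_alt arr
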